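-- pv_equiv track=rewrite | github.com/JRicardo22/Algortimos-de-Agrupamiento | Programas/programa3.py | matriz_abcd
-- ===== SOURCE A (Python) =====
-- def contar_abcd(vec_i, vec_j):
--     a=b=c=d=0
--     for xi, xj in zip(vec_i, vec_j):
--         if xi is None or xj is None:
--             continue
--         if xi==1 and xj==1:
--             a += 1
--         elif xi==1 and xj==0:
--             b += 1
--         elif xi==0 and xj==1:
--             c += 1
--         elif xi==0 and xj==0:
--             d += 1
--     return a,b,c,d
--
-- def matriz_abcd(matriz_bin):
--     n = len(matriz_bin)
--     A = [[0]*n for _ in range(n)]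
--     B = [[0]*n for _ in range(n)]
--     C = [[0]*n for _ in range(n)]
--     D = [[0]*n for _ in range(n)]
--     for i in range(n):
--         A[i][i]=B[i][i]=C[i][i]=0
--         D[i][i]=sum(1 for v in matriz_bin[i] if v==0)  # opcional, diagonal informativa
--         for j in range(i+1, n):
--             a,b,c,d = contar_abcd(matriz_bin[i], matriz_bin[j])
--             A[i][j]=A[j][i]=a
--             B[i][j]=B[j][i]=b
--             C[i][j]=C[j][i]=c
--             D[i][j]=D[j][i]=d
--     return A,B,C,D
-- ===== SOURCE B (Python) =====
-- def matriz_abcd(matriz_bin):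
--     n = len(matriz_bin)
--     ones = [{k for k, v in enumerate(row) if v == 1} for row in matriz_bin]
--     zeros = [{k for k, v in enumerate(row) if v == 0} for row in matriz_bin]
--     A = [[0 if i == j else len(ones[min(i, j)] & ones[max(i, j)]) for j in range(n)] for i in range(n)]
--     B = [[0 if i == j else len(ones[min(i, j)] & zeros[max(i, j)]) for j in range(n)] for i in range(n)]
--     C = [[0 if i == j else len(zeros[min(i, j)] & ones[max(i, j)]) for j in range(n)] for i in range(n)]
--     D = [[len(zeros[i]) if i == j else len(zeros[min(i, j)] & zeros[max(i, j)]) for j in range(n)] for i in range(n)]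
--     return A, B, C, D
-- ===== Notes on version B (the rewrite author's own statement) =====
-- stated objective: alternative
-- what changed: Replaces the per-pair positional zip scan with four counters and in-place symmetric matrix assignment by precomputing, per row, the sets of column indices equal to 1 and to 0, and building the four matrices as pure nested comprehensions whose off-diagonal entries are set-intersection sizes (diagonal kept as in A: 0 for A/B/C, zero-count for D).
import Mathlib
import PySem

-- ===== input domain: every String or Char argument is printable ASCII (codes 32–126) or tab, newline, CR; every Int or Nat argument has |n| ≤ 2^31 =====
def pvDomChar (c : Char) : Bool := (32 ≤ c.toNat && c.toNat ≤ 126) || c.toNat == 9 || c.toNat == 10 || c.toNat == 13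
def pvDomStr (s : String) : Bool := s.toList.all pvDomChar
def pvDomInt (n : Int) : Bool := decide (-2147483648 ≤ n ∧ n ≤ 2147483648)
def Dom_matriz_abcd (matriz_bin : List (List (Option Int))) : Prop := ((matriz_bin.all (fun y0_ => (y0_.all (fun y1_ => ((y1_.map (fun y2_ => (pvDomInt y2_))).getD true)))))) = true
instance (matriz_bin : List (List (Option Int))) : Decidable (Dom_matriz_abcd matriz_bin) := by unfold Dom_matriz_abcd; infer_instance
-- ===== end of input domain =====

-- B replaces A's per-pair positional zip scan plus in-place symmetric assignment by
-- precomputed per-row index sets (columns equal to 1 / to 0) and pure nested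
-- comprehensions whose entries are set-intersection sizes (objective: alternative).

-- ===== PORT A =====
def contar_abcd (vec_i vec_j : List (Option Int)) : Int × Int × Int × Int :=
  (vec_i.zip vec_j).foldl (fun s xy =>
    if xy.1 = none ∨ xy.2 = none then s
    else if xy.1 = some 1 ∧ xy.2 = some 1 then (s.1 + 1, s.2.1, s.2.2.1, s.2.2.2)
    else if xy.1 = some 1 ∧ xy.2 = some 0 then (s.1, s.2.1 + 1, s.2.2.1, s.2.2.2)
    else if xy.1 = some 0 ∧ xy.2 = some 1 then (s.1, s.2.1, s.2.2.1 + 1, s.2.2.2)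
    else if xy.1 = some 0 ∧ xy.2 = some 0 then (s.1, s.2.1, s.2.2.1, s.2.2.2 + 1)
    else s) (0, 0, 0, 0)

-- M[i][j] = x for an n×n list-of-lists matrix (in-range assignment, as in A's loops)
def pvSetM (M : List (List Int)) (i j : Nat) (x : Int) : List (List Int) :=
  M.set i ((M.getD i []).set j x)

def matriz_abcd (matriz_bin : List (List (Option Int))) :
    List (List Int) × List (List Int) × List (List Int) × List (List Int) :=
  let n := matriz_bin.length
  let Z : List (List Int) := List.replicate n (List.replicate n 0)
  (List.range n).foldl (fun s i =>
    let A := pvSetM s.1 i i 0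
    let B := pvSetM s.2.1 i i 0
    let C := pvSetM s.2.2.1 i i 0
    -- sum(1 for v in matriz_bin[i] if v == 0)
    let D := pvSetM s.2.2.2 i i (((matriz_bin.getD i []).filter (fun v => v = some 0)).length : Int)
    (List.range' (i+1) (n - (i+1))).foldl (fun s j =>
      let r := contar_abcd (matriz_bin.getD i []) (matriz_bin.getD j [])
      (pvSetM (pvSetM s.1 i j r.1) j i r.1,
       pvSetM (pvSetM s.2.1 i j r.2.1) j i r.2.1,
       pvSetM (pvSetM s.2.2.1 i j r.2.2.1) j i r.2.2.1,
       pvSetM (pvSetM s.2.2.2 i j r.2.2.2) j i r.2.2.2)) (A, B, C, D)) (Z, Z, Z, Z)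

-- ===== PORT B =====
-- {k for k, v in enumerate(row) if v == 1}
def pvOnes (row : List (Option Int)) : PySem.Set Int :=
  PySem.Set.ofList (((PySem.List.enumerate row).filter (fun kv => kv.2 = some 1)).map Prod.fst)

-- {k for k, v in enumerate(row) if v == 0}
def pvZeros (row : List (Option Int)) : PySem.Set Int :=
  PySem.Set.ofList (((PySem.List.enumerate row).filter (fun kv => kv.2 = some 0)).map Prod.fst)

def matriz_abcd_alt (matriz_bin : List (List (Option Int))) :
    List (List Int) × List (List Int) × List (List Int) × List (List Int) :=
  let n := matriz_bin.length
  let ones := matriz_bin.map pvOnes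
  let zeros := matriz_bin.map pvZeros
  let A := (List.range n).map (fun i => (List.range n).map (fun j =>
    if i = j then (0 : Int)
    else PySem.Set.len (PySem.Set.inter (ones.getD (min i j) []) (ones.getD (max i j) []))))
  let B := (List.range n).map (fun i => (List.range n).map (fun j =>
    if i = j then (0 : Int)
    else PySem.Set.len (PySem.Set.inter (ones.getD (min i j) []) (zeros.getD (max i j) []))))
  let C := (List.range n).map (fun i => (List.range n).map (fun j =>
    if i = j then (0 : Int)
    else PySem.Set.len (PySem.Set.inter (zeros.getD (min i j) []) (ones.getD (max i j) []))))
  let D := (List.range n).map (fun i => (List.range n).map (fun j =>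
    if i = j then PySem.Set.len (zeros.getD i [])
    else PySem.Set.len (PySem.Set.inter (zeros.getD (min i j) []) (zeros.getD (max i j) []))))
  (A, B, C, D)

-- ===== PRECONDITION & SPEC =====
def Spec_matriz_abcd (matriz_bin : List (List (Option Int))) (out : List (List Int) × List (List Int) × List (List Int) × List (List Int)) : Prop := out = matriz_abcd_alt matriz_bin
instance (matriz_bin : List (List (Option Int))) (out : List (List Int) × List (List Int) × List (List Int) × List (List Int)) : Decidable (Spec_matriz_abcd matriz_bin out) := by unfold Spec_matriz_abcd; infer_instance

-- ===== CLAIM (what is proved, stated in full; the proofs are below) =====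
def Claim_equal_matriz_abcd : Prop := ∀ (matriz_bin : List (List (Option Int))), Dom_matriz_abcd matriz_bin → Spec_matriz_abcd matriz_bin (matriz_abcd matriz_bin)

-- ===== LEMMAS AND PROOFS =====

-- ---- generic machinery for A's imperative matrix fill ----
def pvGetE (M : List (List Int)) (p q : Nat) : Int := (M.getD p []).getD q 0

def pvApply (M : List (List Int)) (L : List (Nat × Nat × Int)) : List (List Int) :=
  L.foldl (fun M t => pvSetM M t.1 t.2.1 t.2.2) M

def pvLast (L : List (Nat × Nat × Int)) (p q : Nat) (d : Int) : Int :=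
  L.foldl (fun acc t => if t.1 = p ∧ t.2.1 = q then t.2.2 else acc) d

def pvMatOps (diag : Nat → Int) (v : Nat → Nat → Int) (n : Nat) : List (Nat × Nat × Int) :=
  (List.range n).flatMap (fun i =>
    (i, i, diag i) :: (List.range' (i+1) (n - (i+1))).flatMap
      (fun j => [(i, j, v i j), (j, i, v i j)]))

lemma row_pvSetM (M : List (List Int)) (i j : Nat) (x : Int) (p : Nat) :
    (pvSetM M i j x).getD p [] = if p = i then (M.getD p []).set j x else M.getD p [] := by
  unfold pvSetM
  rcases eq_or_ne p i with h | h
  · subst h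
    rcases Nat.lt_or_ge p M.length with hp | hp
    · simp [List.getD_eq_getElem?_getD, List.getElem?_set, hp]
    · rw [List.set_eq_of_length_le (by simpa using hp)]
      simp [List.getD_eq_getElem?_getD, List.getElem?_eq_none hp]
  · simp [List.getD_eq_getElem?_getD, List.getElem?_set, h, Ne.symm h]

lemma length_pvSetM (M : List (List Int)) (i j : Nat) (x : Int) :
    (pvSetM M i j x).length = M.length := by
  simp [pvSetM]

lemma length_pvApply (M : List (List Int)) (L : List (Nat × Nat × Int)) :
    (pvApply M L).length = M.length := by
  induction L generalizing M with
  | nil => rfl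
  | cons t L ih => simp [pvApply, List.foldl_cons] at *; rw [ih, length_pvSetM]

lemma rowlen_pvApply (M : List (List Int)) (L : List (Nat × Nat × Int)) (p : Nat) :
    ((pvApply M L).getD p []).length = (M.getD p []).length := by
  induction L generalizing M with
  | nil => rfl
  | cons t L ih =>
    show ((pvApply (pvSetM M t.1 t.2.1 t.2.2) L).getD p []).length = _
    rw [ih, row_pvSetM]
    split <;> simp_all

lemma getE_pvSetM (M : List (List Int)) (i j : Nat) (x : Int) (p q : Nat)
    (hi : i < M.length) (hj : j < (M.getD i []).length) :
    pvGetE (pvSetM M i j x) p q = if p = i ∧ q = j then x else pvGetE M p q := by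
  unfold pvGetE
  rw [row_pvSetM]
  rcases eq_or_ne p i with h | h
  · subst h
    rcases eq_or_ne q j with hq | hq
    · subst hq
      simp only [List.getD_eq_getElem?_getD] at hj ⊢
      simp [List.getElem?_set, hj]
    · simp [List.getD_eq_getElem?_getD, List.getElem?_set, hq, Ne.symm hq]
  · simp [h]

lemma getE_pvApply (n : Nat) (M : List (List Int)) (L : List (Nat × Nat × Int))
    (hlen : M.length = n) (hrow : ∀ p, p < n → (M.getD p []).length = n)
    (hL : ∀ t ∈ L, t.1 < n ∧ t.2.1 < n) (p q : Nat) :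
    pvGetE (pvApply M L) p q = pvLast L p q (pvGetE M p q) := by
  induction L generalizing M with
  | nil => rfl
  | cons t L ih =>
    have ht := hL t (by simp)
    have hstep : pvGetE (pvSetM M t.1 t.2.1 t.2.2) p q
        = if t.1 = p ∧ t.2.1 = q then t.2.2 else pvGetE M p q := by
      rw [getE_pvSetM M t.1 t.2.1 t.2.2 p q (by omega) (by rw [hrow t.1 ht.1]; exact ht.2)]
      by_cases h1 : p = t.1 <;> by_cases h2 : q = t.2.1 <;> simp_all [eq_comm]
    show pvGetE (pvApply (pvSetM M t.1 t.2.1 t.2.2) L) p q = _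
    rw [ih (pvSetM M t.1 t.2.1 t.2.2) (by rw [length_pvSetM]; exact hlen)
      (fun r hr => by rw [row_pvSetM]; split <;> simp_all)
      (fun s hs => hL s (by simp [hs]))]
    rw [hstep]
    rfl

lemma pvLast_append (L1 L2 : List (Nat × Nat × Int)) (p q : Nat) (d : Int) :
    pvLast (L1 ++ L2) p q d = pvLast L2 p q (pvLast L1 p q d) := by
  simp [pvLast, List.foldl_append]

lemma pvLast_nomatch (L : List (Nat × Nat × Int)) (p q : Nat) (d : Int)
    (h : ∀ t ∈ L, ¬(t.1 = p ∧ t.2.1 = q)) : pvLast L p q d = d := by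
  induction L generalizing d with
  | nil => rfl
  | cons t L ih =>
    show pvLast L p q (if t.1 = p ∧ t.2.1 = q then t.2.2 else d) = d
    rw [if_neg (h t (by simp))]
    exact ih d (fun s hs => h s (by simp [hs]))

lemma pvLast_flatMap_single {β : Type} (l : List β) (f : β → List (Nat × Nat × Int))
    (p q : Nat) (d : Int) (j0 : β) (hnd : l.Nodup) (hj : j0 ∈ l)
    (h0 : ∀ j ∈ l, j ≠ j0 → ∀ t ∈ f j, ¬(t.1 = p ∧ t.2.1 = q)) :
    pvLast (l.flatMap f) p q d = pvLast (f j0) p q d := by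
  induction l generalizing d with
  | nil => cases hj
  | cons b l ih =>
    rw [List.flatMap_cons, pvLast_append]
    rcases List.mem_cons.mp hj with hb | hb
    · subst hb
      exact pvLast_nomatch _ p q _ (fun t ht => by
        obtain ⟨j, hjl, hjt⟩ := List.mem_flatMap.mp ht
        exact h0 j (by simp [hjl]) (fun he => (List.nodup_cons.mp hnd).1 (he ▸ hjl)) t hjt)
    · rw [pvLast_nomatch (f b) p q d (h0 b (by simp)
        (fun he => (List.nodup_cons.mp hnd).1 (he ▸ hb)))]
      exact ih d (List.nodup_cons.mp hnd).2 hb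
        (fun j hjl hne t ht => h0 j (List.mem_cons.mpr (Or.inr hjl)) hne t ht)

lemma pvLast_pair (i j : Nat) (x : Int) (p q : Nat) (hne : p ≠ q)
    (hm : (i = p ∧ j = q) ∨ (j = p ∧ i = q)) :
    pvLast [(i, j, x), (j, i, x)] p q 0 = x := by
  rcases hm with ⟨h1, h2⟩ | ⟨h1, h2⟩ <;> subst h1 <;> subst h2 <;>
    simp [pvLast, hne, Ne.symm hne]

lemma matOps_entry (diag : Nat → Int) (v : Nat → Nat → Int) (n p q : Nat)
    (hp : p < n) (hq : q < n) :
    pvLast (pvMatOps diag v n) p q 0 = if p = q then diag p else v (min p q) (max p q) := by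
  have inner_mem : ∀ (i : Nat) (t : Nat × Nat × Int),
      t ∈ (List.range' (i+1) (n - (i+1))).flatMap
        (fun j => [(i, j, v i j), (j, i, v i j)]) →
      ∃ j, i < j ∧ j < n ∧ (t = (i, j, v i j) ∨ t = (j, i, v i j)) := by
    intro i t ht
    obtain ⟨j, hj, htj⟩ := List.mem_flatMap.mp ht
    obtain ⟨m, hm, hjm⟩ := List.mem_range'.mp hj
    simp only [List.mem_cons, List.not_mem_nil, or_false] at htj
    exact ⟨j, by omega, by omega, htj⟩
  unfold pvMatOps
  rcases eq_or_ne p q with rfl | hpq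
  · rw [if_pos rfl,
      pvLast_flatMap_single (List.range n) _ p p 0 p List.nodup_range
        (List.mem_range.mpr hp) ?_]
    · show pvLast _ p p (if (p, p, diag p).1 = p ∧ (p, p, diag p).2.1 = p then diag p else 0) = _
      rw [if_pos ⟨rfl, rfl⟩]
      refine pvLast_nomatch _ p p (diag p) ?_
      intro t ht hm
      obtain ⟨j, hij, hjn, hc⟩ := inner_mem p t ht
      rcases hc with rfl | rfl <;>
        (obtain ⟨h1, h2⟩ := hm; simp only at h1 h2; omega)
    · intro i _ hne t ht hm
      rcases List.mem_cons.mp ht with rfl | ht'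
      · exact hne (by simpa using hm.1)
      · obtain ⟨j, hij, hjn, hc⟩ := inner_mem i t ht'
        rcases hc with rfl | rfl <;>
          (obtain ⟨h1, h2⟩ := hm; simp only at h1 h2; omega)
  · rw [if_neg hpq,
      pvLast_flatMap_single (List.range n) _ p q 0 (min p q) List.nodup_range
        (List.mem_range.mpr (by omega)) ?_]
    · show pvLast _ p q (if (min p q, min p q, diag (min p q)).1 = p ∧
          (min p q, min p q, diag (min p q)).2.1 = q then diag (min p q) else 0) = _
      rw [if_neg (by
        rintro ⟨h1, h2⟩
        simp only at h1 h2
        omega)]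
      rw [pvLast_flatMap_single (List.range' (min p q + 1) (n - (min p q + 1))) _
            p q 0 (max p q) (List.nodup_range' 1)
            (List.mem_range'.mpr ⟨max p q - (min p q + 1), by omega, by omega⟩) ?_]
      · exact pvLast_pair (min p q) (max p q) _ p q hpq (by omega)
      · intro j hj hne t ht hm
        obtain ⟨m, hm', hjm⟩ := List.mem_range'.mp hj
        simp only [List.mem_cons, List.not_mem_nil, or_false] at ht
        rcases ht with rfl | rfl <;>
          (obtain ⟨h1, h2⟩ := hm; simp only at h1 h2; omega)
    · intro i _ hne t ht hm
      rcases List.mem_cons.mp ht with rfl | ht'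
      · obtain ⟨h1, h2⟩ := hm
        simp only at h1 h2
        omega
      · obtain ⟨j, hij, hjn, hc⟩ := inner_mem i t ht'
        rcases hc with rfl | rfl <;>
          (obtain ⟨h1, h2⟩ := hm; simp only at h1 h2; omega)

lemma matOps_bound (diag : Nat → Int) (v : Nat → Nat → Int) (n : Nat) :
    ∀ t ∈ pvMatOps diag v n, t.1 < n ∧ t.2.1 < n := by
  intro t ht
  obtain ⟨i, hi, hti⟩ := List.mem_flatMap.mp ht
  have hi' : i < n := List.mem_range.mp hi
  rcases List.mem_cons.mp hti with h | h
  · subst h; exact ⟨hi', hi'⟩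
  · obtain ⟨j, hj, htj⟩ := List.mem_flatMap.mp h
    obtain ⟨k, hk, hjk⟩ := List.mem_range'.mp hj
    have hj' : j < n := by omega
    simp only [List.mem_cons, List.not_mem_nil, or_false] at htj
    rcases htj with h | h <;> subst h
    · exact ⟨hi', hj'⟩
    · exact ⟨hj', hi'⟩

-- ---- the values A writes ----
def pvA (mb : List (List (Option Int))) (i j : Nat) : Int :=
  (contar_abcd (mb.getD i []) (mb.getD j [])).1
def pvB (mb : List (List (Option Int))) (i j : Nat) : Int :=
  (contar_abcd (mb.getD i []) (mb.getD j [])).2.1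
def pvC (mb : List (List (Option Int))) (i j : Nat) : Int :=
  (contar_abcd (mb.getD i []) (mb.getD j [])).2.2.1
def pvD (mb : List (List (Option Int))) (i j : Nat) : Int :=
  (contar_abcd (mb.getD i []) (mb.getD j [])).2.2.2
def pvZC (mb : List (List (Option Int))) (i : Nat) : Int :=
  (((mb.getD i []).filter (fun v => v = some 0)).length : Int)

lemma foldl_quad {ι : Type} (l : List ι)
    (f1 f2 f3 f4 : ι → List (Nat × Nat × Int))
    (s : List (List Int) × List (List Int) × List (List Int) × List (List Int)) :
    l.foldl (fun s i => (pvApply s.1 (f1 i), pvApply s.2.1 (f2 i),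
      pvApply s.2.2.1 (f3 i), pvApply s.2.2.2 (f4 i))) s
    = (pvApply s.1 (l.flatMap f1), pvApply s.2.1 (l.flatMap f2),
       pvApply s.2.2.1 (l.flatMap f3), pvApply s.2.2.2 (l.flatMap f4)) := by
  induction l generalizing s with
  | nil => simp [pvApply]
  | cons b l ih =>
    simp only [List.foldl_cons, List.flatMap_cons, ih]
    simp [pvApply, List.foldl_append]

lemma portA_eq (mb : List (List (Option Int))) :
    matriz_abcd mb =
      (pvApply (List.replicate mb.length (List.replicate mb.length 0))
         (pvMatOps (fun _ => 0) (pvA mb) mb.length),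
       pvApply (List.replicate mb.length (List.replicate mb.length 0))
         (pvMatOps (fun _ => 0) (pvB mb) mb.length),
       pvApply (List.replicate mb.length (List.replicate mb.length 0))
         (pvMatOps (fun _ => 0) (pvC mb) mb.length),
       pvApply (List.replicate mb.length (List.replicate mb.length 0))
         (pvMatOps (pvZC mb) (pvD mb) mb.length)) := by
  show (List.range mb.length).foldl _ _ = _
  have hF : (fun (s : List (List Int) × List (List Int) × List (List Int) × List (List Int)) (i : Nat) =>
      let A := pvSetM s.1 i i 0
      let B := pvSetM s.2.1 i i 0
      let C := pvSetM s.2.2.1 i i 0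
      let D := pvSetM s.2.2.2 i i (((mb.getD i []).filter (fun v => v = some 0)).length : Int)
      (List.range' (i+1) (mb.length - (i+1))).foldl (fun s j =>
        let r := contar_abcd (mb.getD i []) (mb.getD j [])
        (pvSetM (pvSetM s.1 i j r.1) j i r.1,
         pvSetM (pvSetM s.2.1 i j r.2.1) j i r.2.1,
         pvSetM (pvSetM s.2.2.1 i j r.2.2.1) j i r.2.2.1,
         pvSetM (pvSetM s.2.2.2 i j r.2.2.2) j i r.2.2.2)) (A, B, C, D))
    = (fun s i =>
      (pvApply s.1 ((i, i, 0) :: (List.range' (i+1) (mb.length - (i+1))).flatMap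
          (fun j => [(i, j, pvA mb i j), (j, i, pvA mb i j)])),
       pvApply s.2.1 ((i, i, 0) :: (List.range' (i+1) (mb.length - (i+1))).flatMap
          (fun j => [(i, j, pvB mb i j), (j, i, pvB mb i j)])),
       pvApply s.2.2.1 ((i, i, 0) :: (List.range' (i+1) (mb.length - (i+1))).flatMap
          (fun j => [(i, j, pvC mb i j), (j, i, pvC mb i j)])),
       pvApply s.2.2.2 ((i, i, pvZC mb i) :: (List.range' (i+1) (mb.length - (i+1))).flatMap
          (fun j => [(i, j, pvD mb i j), (j, i, pvD mb i j)])))) := by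
    funext s i
    show (List.range' (i+1) (mb.length - (i+1))).foldl _ _ = _
    have hG : (fun (s : List (List Int) × List (List Int) × List (List Int) × List (List Int)) (j : Nat) =>
        let r := contar_abcd (mb.getD i []) (mb.getD j [])
        (pvSetM (pvSetM s.1 i j r.1) j i r.1,
         pvSetM (pvSetM s.2.1 i j r.2.1) j i r.2.1,
         pvSetM (pvSetM s.2.2.1 i j r.2.2.1) j i r.2.2.1,
         pvSetM (pvSetM s.2.2.2 i j r.2.2.2) j i r.2.2.2))
      = (fun s j =>
        (pvApply s.1 [(i, j, pvA mb i j), (j, i, pvA mb i j)],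
         pvApply s.2.1 [(i, j, pvB mb i j), (j, i, pvB mb i j)],
         pvApply s.2.2.1 [(i, j, pvC mb i j), (j, i, pvC mb i j)],
         pvApply s.2.2.2 [(i, j, pvD mb i j), (j, i, pvD mb i j)])) := by
      funext s j
      rfl
    rw [hG, foldl_quad]
    rfl
  rw [hF, foldl_quad]
  rfl

-- ---- index lists and the counting core ----
def pvIdx (pr : Option Int → Bool) : Int → List (Option Int) → List Int
  | _, [] => []
  | k, x :: xs => if pr x then k :: pvIdx pr (k+1) xs else pvIdx pr (k+1) xs

lemma pvIdx_ge (pr : Option Int → Bool) (xs : List (Option Int)) (k : Int) :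
    ∀ m ∈ pvIdx pr k xs, k ≤ m := by
  induction xs generalizing k with
  | nil => simp [pvIdx]
  | cons x xs ih =>
    intro m hm
    simp only [pvIdx] at hm
    split at hm
    · rcases List.mem_cons.mp hm with h | h
      · omega
      · have := ih (k+1) m h; omega
    · have := ih (k+1) m hm; omega

lemma pvIdx_nodup (pr : Option Int → Bool) (xs : List (Option Int)) (k : Int) :
    (pvIdx pr k xs).Nodup := by
  induction xs generalizing k with
  | nil => simp [pvIdx]
  | cons x xs ih =>
    simp only [pvIdx]
    split
    · exact List.nodup_cons.mpr ⟨fun h => by have := pvIdx_ge pr xs (k+1) k h; omega, ih (k+1)⟩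
    · exact ih (k+1)

lemma pvIdx_length (pr : Option Int → Bool) (xs : List (Option Int)) (k : Int) :
    (pvIdx pr k xs).length = xs.countP pr := by
  induction xs generalizing k with
  | nil => rfl
  | cons x xs ih =>
    simp only [pvIdx, List.countP_cons]
    split <;> simp_all <;> omega

lemma enum_filter_map (pr : Option Int → Bool) (row : List (Option Int)) (k : Int) :
    ((PySem.List.enumerate row k).filter (fun kv => pr kv.2)).map Prod.fst
      = pvIdx pr k row := by
  induction row generalizing k with
  | nil => rfl
  | cons x xs ih =>
    rw [PySem.List.enumerate_cons]
    simp only [List.filter_cons, pvIdx]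
    cases h : pr x <;> simp [h, ih]

lemma pvOnes_eq (row : List (Option Int)) :
    pvOnes row = pvIdx (fun v => decide (v = some 1)) 0 row := by
  rw [pvOnes, enum_filter_map (fun v => decide (v = some 1)) row 0]
  exact PySem.Set.ofList_eq_self_of_nodup _ (pvIdx_nodup _ _ _)

lemma pvZeros_eq (row : List (Option Int)) :
    pvZeros row = pvIdx (fun v => decide (v = some 0)) 0 row := by
  rw [pvZeros, enum_filter_map (fun v => decide (v = some 0)) row 0]
  exact PySem.Set.ofList_eq_self_of_nodup _ (pvIdx_nodup _ _ _)

lemma core_count (pr qr : Option Int → Bool) (u v : List (Option Int)) (k : Int) :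
    ((pvIdx pr k u).filter (fun x => (pvIdx qr k v).contains x)).length
      = (u.zip v).countP (fun t => pr t.1 && qr t.2) := by
  induction u generalizing v k with
  | nil => simp [pvIdx]
  | cons x u ih =>
    cases v with
    | nil => simp [pvIdx]
    | cons y v =>
      have hcongr : ∀ (S : List Int),
          ((pvIdx pr (k+1) u).filter (fun z => (k :: S).contains z)).length
            = ((pvIdx pr (k+1) u).filter (fun z => S.contains z)).length := by
        intro S
        congr 1
        refine List.filter_congr ?_
        intro z hz
        have hge := pvIdx_ge pr u (k+1) z hz
        simp [List.contains_cons, show z ≠ k by omega]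
      have hknot : ∀ (w : List (Option Int)), ((pvIdx qr (k+1) w).contains k) = false := by
        intro w
        rcases h : (pvIdx qr (k+1) w).contains k with _ | _
        · rfl
        · have := pvIdx_ge qr w (k+1) k (by simpa using h)
          omega
      simp only [pvIdx, List.zip_cons_cons, List.countP_cons]
      cases hpx : pr x <;> cases hqy : qr y <;>
        simp only [if_pos, if_neg, Bool.false_and, Bool.true_and, hpx, hqy,
          Bool.false_eq_true, if_false, if_true]
      · rw [ih]
        simp
      · rw [hcongr, ih]
        simp
      · rw [List.filter_cons_of_neg (by
            intro h
            have hm : k ∈ pvIdx qr (k+1) v := by simpa using h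
            have := pvIdx_ge qr v (k+1) k hm
            omega), ih]
        simp
      · rw [List.filter_cons_of_pos (by simp [List.contains_cons]), List.length_cons,
          hcongr, ih]

lemma contar_step (a b c d : Int) (x y : Option Int) :
    (if x = none ∨ y = none then (a, b, c, d)
      else if x = some 1 ∧ y = some 1 then (a + 1, b, c, d)
      else if x = some 1 ∧ y = some 0 then (a, b + 1, c, d)
      else if x = some 0 ∧ y = some 1 then (a, b, c + 1, d)
      else if x = some 0 ∧ y = some 0 then (a, b, c, d + 1)
      else (a, b, c, d))
    = (a + if x = some 1 ∧ y = some 1 then 1 else 0,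
       b + if x = some 1 ∧ y = some 0 then 1 else 0,
       c + if x = some 0 ∧ y = some 1 then 1 else 0,
       d + if x = some 0 ∧ y = some 0 then 1 else 0) := by
  rcases x with _ | xv <;> rcases y with _ | yv <;> split_ifs <;> simp_all

-- step function of contar_abcd in closed form
lemma contar_eq (u v : List (Option Int)) :
    contar_abcd u v =
      (((u.zip v).countP (fun t => decide (t.1 = some 1) && decide (t.2 = some 1)) : Int),
       ((u.zip v).countP (fun t => decide (t.1 = some 1) && decide (t.2 = some 0)) : Int),
       ((u.zip v).countP (fun t => decide (t.1 = some 0) && decide (t.2 = some 1)) : Int),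
       ((u.zip v).countP (fun t => decide (t.1 = some 0) && decide (t.2 = some 0)) : Int)) := by
  unfold contar_abcd
  have key : ∀ (l : List (Option Int × Option Int)) (a b c d : Int),
      l.foldl (fun s xy =>
        if xy.1 = none ∨ xy.2 = none then s
        else if xy.1 = some 1 ∧ xy.2 = some 1 then (s.1 + 1, s.2.1, s.2.2.1, s.2.2.2)
        else if xy.1 = some 1 ∧ xy.2 = some 0 then (s.1, s.2.1 + 1, s.2.2.1, s.2.2.2)
        else if xy.1 = some 0 ∧ xy.2 = some 1 then (s.1, s.2.1, s.2.2.1 + 1, s.2.2.2)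
        else if xy.1 = some 0 ∧ xy.2 = some 0 then (s.1, s.2.1, s.2.2.1, s.2.2.2 + 1)
        else s) (a, b, c, d)
      = (a + (l.countP (fun t => decide (t.1 = some 1) && decide (t.2 = some 1)) : Int),
         b + (l.countP (fun t => decide (t.1 = some 1) && decide (t.2 = some 0)) : Int),
         c + (l.countP (fun t => decide (t.1 = some 0) && decide (t.2 = some 1)) : Int),
         d + (l.countP (fun t => decide (t.1 = some 0) && decide (t.2 = some 0)) : Int)) := by
    intro l
    induction l with
    | nil => intro a b c d; simp
    | cons t l ih =>
      intro a b c d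
      obtain ⟨x, y⟩ := t
      rw [List.foldl_cons]
      have hstep := contar_step a b c d x y
      rw [hstep, ih]
      simp only [List.countP_cons, Bool.and_eq_true, decide_eq_true_eq, Prod.mk.injEq]
      refine ⟨?_, ?_, ?_, ?_⟩ <;> split_ifs <;> push_cast <;> ring
  rw [key]
  simp

lemma inter_len (pr qr : Option Int → Bool) (u v : List (Option Int)) :
    PySem.Set.len (PySem.Set.inter (pvIdx pr 0 u) (pvIdx qr 0 v))
      = (((u.zip v).countP (fun t => pr t.1 && qr t.2) : Nat) : Int) := by
  show ((((pvIdx pr 0 u).filter (fun x => (pvIdx qr 0 v).contains x)).length : Nat) : Int) = _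
  rw [core_count]

lemma zeros_len (row : List (Option Int)) :
    PySem.Set.len (pvZeros row) = ((row.filter (fun v => v = some 0)).length : Int) := by
  rw [pvZeros_eq]
  show ((pvIdx (fun v => decide (v = some 0)) 0 row).length : Int) = _
  rw [pvIdx_length, List.countP_eq_length_filter]

lemma getD_replicate0 (n q : Nat) : (List.replicate n (0 : Int)).getD q 0 = 0 := by
  rw [List.getD_eq_getElem?_getD]
  rcases Nat.lt_or_ge q n with h | h
  · simp [List.getElem?_replicate, h]
  · rw [List.getElem?_eq_none (l := List.replicate n (0 : Int)) (by simpa using h)]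
    rfl

lemma getE_Z (n p q : Nat) :
    pvGetE (List.replicate n (List.replicate n (0 : Int))) p q = 0 := by
  unfold pvGetE
  rcases Nat.lt_or_ge p n with hp | hp
  · have h : (List.replicate n (List.replicate n (0 : Int))).getD p [] = List.replicate n 0 := by
      rw [List.getD_eq_getElem?_getD, List.getElem?_replicate]
      simp [hp]
    rw [h, getD_replicate0]
  · have h : (List.replicate n (List.replicate n (0 : Int))).getD p [] = [] := by
      rw [List.getD_eq_getElem?_getD,
        List.getElem?_eq_none (l := List.replicate n (List.replicate n (0 : Int))) (by simpa using hp)]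
      rfl
    rw [h]
    rfl

lemma getElem_eq_getD (M : List (List Int)) (p : Nat) (h : p < M.length) :
    M[p] = M.getD p [] := by
  simp [List.getD_eq_getElem?_getD, List.getElem?_eq_getElem h]

lemma rowZ (n p : Nat) (hp : p < n) :
    ((List.replicate n (List.replicate n (0 : Int))).getD p []).length = n := by
  simp [List.getD_eq_getElem?_getD, List.getElem?_replicate, hp]

lemma map_getD (f : List (Option Int) → PySem.Set Int) (mb : List (List (Option Int)))
    (i : Nat) (h : i < mb.length) : (mb.map f).getD i [] = f (mb.getD i []) := by
  have h2 : i < (mb.map f).length := by simpa using h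
  rw [List.getD_eq_getElem?_getD, List.getElem?_eq_getElem h2, List.getElem_map,
    Option.getD_some, List.getD_eq_getElem?_getD, List.getElem?_eq_getElem h,
    Option.getD_some]

lemma mat_eq (n : Nat) (diag : Nat → Int) (v : Nat → Nat → Int) (e : Nat → Nat → Int)
    (hdiag : ∀ p, p < n → diag p = e p p)
    (hv : ∀ p q, p < n → q < n → p ≠ q → v (min p q) (max p q) = e p q) :
    pvApply (List.replicate n (List.replicate n 0)) (pvMatOps diag v n)
      = (List.range n).map (fun i => (List.range n).map (fun j => e i j)) := by
  apply List.ext_getElem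
  · rw [length_pvApply]
    simp
  · intro p h1 h2
    have hp : p < n := by
      rw [length_pvApply] at h1
      simpa using h1
    apply List.ext_getElem
    · rw [getElem_eq_getD _ _ h1, rowlen_pvApply, rowZ n p hp]
      simp [hp]
    · intro q hq1 hq2
      have hq : q < n := by
        rw [getElem_eq_getD _ _ h1, rowlen_pvApply, rowZ n p hp] at hq1
        exact hq1
      have hL : pvGetE (pvApply (List.replicate n (List.replicate n 0))
          (pvMatOps diag v n)) p q = if p = q then diag p else v (min p q) (max p q) := by
        rw [getE_pvApply n _ _ (by simp) (fun r hr => rowZ n r hr)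
          (matOps_bound diag v n) p q, getE_Z, matOps_entry diag v n p q hp hq]
      have hgetE : (pvApply (List.replicate n (List.replicate n 0))
          (pvMatOps diag v n))[p][q]
          = pvGetE (pvApply (List.replicate n (List.replicate n 0)) (pvMatOps diag v n)) p q := by
        unfold pvGetE
        rw [← getElem_eq_getD _ _ h1, List.getD_eq_getElem?_getD,
          List.getElem?_eq_getElem hq1, Option.getD_some]
      rw [hgetE, hL]
      simp only [List.getElem_map, List.getElem_range]
      rcases eq_or_ne p q with rfl | hne
      · simp [hdiag p hp]
      · rw [if_neg hne, hv p q hp hq hne]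

-- ===== VERDICT (by name: the statement is the Claim_ definition above) =====


theorem matriz_abcd_spec : Claim_equal_matriz_abcd := by
  intro mb _
  show matriz_abcd mb = matriz_abcd_alt mb
  rw [portA_eq]
  simp only [matriz_abcd_alt]
  simp only [Prod.mk.injEq]
  have hones : ∀ i, i < mb.length →
      (mb.map pvOnes).getD i [] = pvIdx (fun v => decide (v = some 1)) 0 (mb.getD i []) := by
    intro i h
    rw [map_getD pvOnes mb i h, pvOnes_eq]
  have hzeros : ∀ i, i < mb.length →
      (mb.map pvZeros).getD i [] = pvIdx (fun v => decide (v = some 0)) 0 (mb.getD i []) := by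
    intro i h
    rw [map_getD pvZeros mb i h, pvZeros_eq]
  refine ⟨?_, ?_, ?_, ?_⟩
  · refine mat_eq mb.length _ _ _ (fun p hp => by simp) ?_
    intro p q hp hq hne
    rw [if_neg hne, hones _ (by omega), hones _ (by omega), inter_len, pvA, contar_eq]
  · refine mat_eq mb.length _ _ _ (fun p hp => by simp) ?_
    intro p q hp hq hne
    rw [if_neg hne, hones _ (by omega), hzeros _ (by omega), inter_len, pvB, contar_eq]
  · refine mat_eq mb.length _ _ _ (fun p hp => by simp) ?_
    intro p q hp hq hne
    rw [if_neg hne, hzeros _ (by omega), hones _ (by omega), inter_len, pvC, contar_eq]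
  · refine mat_eq mb.length _ _ _ ?_ ?_
    · intro p hp
      rw [if_pos rfl, map_getD pvZeros mb p hp, zeros_len, pvZC]
    · intro p q hp hq hne
      rw [if_neg hne, hzeros _ (by omega), hzeros _ (by omega), inter_len, pvD, contar_eq]
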